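-- pv_equiv track=rewrite | github.com/gyeonse0/realrealrealreal | examples_with_charging1/Repair.py | drone_repair_visit_type_update
-- ===== SOURCE A (Python) =====
-- IDLE = 0 # 해당 노드에 드론이 트럭에 업힌 상태의 경우
--
-- FLY = 1 # 해당 노드에서 트럭이 드론의 임무를 위해 드론을 날려주는 경우
--
-- ONLY_DRONE = 2 # 해당 노드에 드론만이 임무를 수행하는 서비스 노드인 경우
--
-- CATCH = 3 # 해당 노드에서 트럭이 임무를 마친 드론을 받는 경우
--
-- ONLY_TRUCK = 4 # 해당 노드에서 트럭만이 임무를 수행하는 경우 (드론이 업혀있지 않음)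
--
-- def drone_repair_visit_type_update(routes):
--     """
--     visit_type update 함수
--     """
--
--     for route in routes:
--         for j in range(1,len(route)):
--             if route[j][1] is None:
--                 route[j] = (route[j][0], ONLY_DRONE)
--                 k = j - 1  # 현재 노드의 이전 노드부터 시작
--                 while k >= 0:
--                     if route[k][1] is not None and route[k][1] is not ONLY_DRONE and route[k][1] is not ONLY_TRUCK:  # 이전 노드가 None이 아닌 경우
--                         if route[k][1] == IDLE:
--                             route[k] = (route[k][0], FLY)
--                         elif route[k][1] == FLY:
--                             route[k] = (route[k][0], FLY)
--                         elif route[k][1] == CATCH: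
--                             route[k] = (route[k][0], FLY)
--                         break  # 노드의 상태를 설정했으므로 루프를 종료합니다.
--                     k -= 1  # k를 감소하여 이전 노드로 이동
--
--                 l = j + 1
--                 while l < len(route):
--                     if route[l][1] is not None and route[l][1] is not ONLY_DRONE and route[l][1] is not ONLY_TRUCK:
--                         if route[l][1] == IDLE:
--                             route[l] = (route[l][0], CATCH)
--                         elif route[l][1] == FLY:
--                             route[l] = (route[l][0], FLY)
--                         elif route[l][1] == CATCH:
--                             route[l] = (route[l][0], CATCH)
--                         break  # 노드의 상태를 설정했으므로 루프를 종료합니다.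
--                     l += 1  # k를 감소하여 이전 노드로 이동
--
--     return routes
-- ===== SOURCE B (Python) =====
-- IDLE = 0
-- FLY = 1
-- ONLY_DRONE = 2
-- CATCH = 3
-- ONLY_TRUCK = 4
--
-- def drone_repair_visit_type_update(routes):
--     """Single left-to-right pass per route: keep the last 'anchor' node (visit
--     type not None/ONLY_DRONE/ONLY_TRUCK) pending; each drone-only (None) node
--     immediately turns the pending anchor into a catch->FLY and flags the next
--     anchor to become CATCH (FLY stays FLY). O(n) per route instead of rescans.
--     Mutates the inner route lists in place, like the original."""
--     for route in routes:
--         done = []          # finalized prefix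
--         cur = None         # pending last anchor (id, vt), value may still change
--         buf = []           # non-anchor elements after the pending anchor
--         seen = False       # a drone-only node seen since the last anchor
--         for i, (nid, vt) in enumerate(route):
--             if vt is None and i > 0:
--                 buf.append((nid, ONLY_DRONE))
--                 if cur is not None and cur[1] in (IDLE, FLY, CATCH):
--                     cur = (cur[0], FLY)
--                 seen = True
--             elif vt is None or vt == ONLY_DRONE or vt == ONLY_TRUCK:
--                 buf.append((nid, vt))
--             else:
--                 done.extend([cur] if cur is not None else [])
--                 done.extend(buf)
--                 if seen and vt == IDLE:
--                     vt = CATCH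
--                 cur = (nid, vt)
--                 buf = []
--                 seen = False
--         done.extend([cur] if cur is not None else [])
--         done.extend(buf)
--         route[:] = done
--     return routes
-- ===== Notes on version B (the rewrite author's own statement) =====
-- stated objective: alternative
-- what changed: Replaces A's per-None-node backward and forward rescans over the route with a single left-to-right pass that keeps the last eligible 'anchor' node pending and a seen-drone-node flag, updating the anchor in O(1) per node (worst-case O(n) per route vs A's worst-case O(n^2); not measurably faster on random inputs).
import Mathlib
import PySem

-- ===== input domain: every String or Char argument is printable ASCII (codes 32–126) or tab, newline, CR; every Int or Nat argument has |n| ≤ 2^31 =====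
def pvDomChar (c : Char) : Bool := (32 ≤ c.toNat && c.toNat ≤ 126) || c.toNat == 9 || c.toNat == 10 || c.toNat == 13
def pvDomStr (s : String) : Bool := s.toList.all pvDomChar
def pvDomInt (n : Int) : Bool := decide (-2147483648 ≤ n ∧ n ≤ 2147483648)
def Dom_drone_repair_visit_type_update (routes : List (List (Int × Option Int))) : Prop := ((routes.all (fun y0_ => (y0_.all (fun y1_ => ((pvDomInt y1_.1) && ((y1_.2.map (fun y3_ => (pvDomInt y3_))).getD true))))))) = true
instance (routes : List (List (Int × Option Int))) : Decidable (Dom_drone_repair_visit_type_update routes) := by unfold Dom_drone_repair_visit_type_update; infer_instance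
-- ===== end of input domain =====

-- A mutates the inner route lists in place and returns the same outer list; B performs the
-- same in-place mutation in Python; the equivalence proved here is about the returned value.

-- ===== PORT A =====
-- while k >= 0 loop of A: fuel k means the current index is k-1 (loop ends when k-1 < 0)
def pvFindBack (r : List (Int × Option Int)) : Nat → List (Int × Option Int)
  | 0 => r
  | k+1 =>
    let e := PySem.List.pyGetD r (k : Int) (0, none)
    if e.2 ≠ none ∧ e.2 ≠ some 2 ∧ e.2 ≠ some 4 then
      if e.2 = some 0 then r.set k (e.1, some 1)
      else if e.2 = some 1 then r.set k (e.1, some 1)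
      else if e.2 = some 3 then r.set k (e.1, some 1)
      else r
    else pvFindBack r k

-- while l < len(route) loop of A: fuel counts the remaining iterations
def pvFindFwd : List (Int × Option Int) → Nat → Nat → List (Int × Option Int)
  | r, _, 0 => r
  | r, l, f+1 =>
    if l < r.length then
      let e := PySem.List.pyGetD r (l : Int) (0, none)
      if e.2 ≠ none ∧ e.2 ≠ some 2 ∧ e.2 ≠ some 4 then
        if e.2 = some 0 then r.set l (e.1, some 3)
        else if e.2 = some 1 then r.set l (e.1, some 1)
        else if e.2 = some 3 then r.set l (e.1, some 3)
        else r
      else pvFindFwd r (l+1) f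
    else r

-- body of the `for j in range(1, len(route))` loop
def pvStepA (r : List (Int × Option Int)) (j : Nat) : List (Int × Option Int) :=
  let e := PySem.List.pyGetD r (j : Int) (0, none)
  if e.2 = none then
    let r1 := r.set j (e.1, some 2)
    let r2 := pvFindBack r1 j
    pvFindFwd r2 (j+1) (r2.length - (j+1))
  else r

-- the j-loop itself (j runs 1,2,…; fuel = number of remaining iterations)
def pvLoopA : List (Int × Option Int) → Nat → Nat → List (Int × Option Int)
  | r, _, 0 => r
  | r, j, f+1 => pvLoopA (pvStepA r j) (j+1) f

def drone_repair_visit_type_update (routes : List (List (Int × Option Int))) : List (List (Int × Option Int)) :=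
  routes.map (fun route => pvLoopA route 1 (route.length - 1))

-- ===== PORT B =====
-- single pass over the route; state: finalized prefix `done`, pending anchor `cur`,
-- non-anchor tail `buf` since the pending anchor, `seen` = drone-only node seen since it
def pvGoB : List (Int × Option Int) → Nat → List (Int × Option Int) → Option (Int × Option Int) → List (Int × Option Int) → Bool → List (Int × Option Int)
  | [], _, done, cur, buf, _ => done ++ cur.toList ++ buf
  | (nid, vt) :: t, i, done, cur, buf, seen =>
    if vt = none ∧ 0 < i then
      pvGoB t (i+1) done
        (match cur with
          | some (cid, cv) =>
            if cv = some 0 ∨ cv = some 1 ∨ cv = some 3 then some (cid, some 1) else some (cid, cv)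
          | none => none)
        (buf ++ [(nid, some 2)]) true
    else if vt = none ∨ vt = some 2 ∨ vt = some 4 then
      pvGoB t (i+1) done cur (buf ++ [(nid, vt)]) seen
    else
      pvGoB t (i+1) (done ++ cur.toList ++ buf)
        (some (nid, if seen ∧ vt = some 0 then some 3 else vt)) [] false

def drone_repair_visit_type_update_alt (routes : List (List (Int × Option Int))) : List (List (Int × Option Int)) :=
  routes.map (fun r => pvGoB r 0 [] none [] false)

-- ===== PRECONDITION & SPEC =====
def Spec_drone_repair_visit_type_update (routes : List (List (Int × Option Int))) (out : List (List (Int × Option Int))) : Prop := out = drone_repair_visit_type_update_alt routes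
instance (routes : List (List (Int × Option Int))) (out : List (List (Int × Option Int))) : Decidable (Spec_drone_repair_visit_type_update routes out) := by unfold Spec_drone_repair_visit_type_update; infer_instance

-- ===== CLAIM (what is proved, stated in full; the proofs are below) =====
def Claim_equal_drone_repair_visit_type_update : Prop := ∀ (routes : List (List (Int × Option Int))), Dom_drone_repair_visit_type_update routes → Spec_drone_repair_visit_type_update routes (drone_repair_visit_type_update routes)

-- ===== LEMMAS AND PROOFS =====

-- an "anchor" is a node A's two scans stop at: visit type not None, ONLY_DRONE or ONLY_TRUCK
def pvAnchor (v : Option Int) : Bool :=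
  match v with
  | none => false
  | some x => !(x == 2) && !(x == 4)

lemma pvAnchor_true {v : Option Int} (h : pvAnchor v = true) :
    v ≠ none ∧ v ≠ some 2 ∧ v ≠ some 4 := by
  cases v with
  | none => simp [pvAnchor] at h
  | some x =>
    simp [pvAnchor] at h
    obtain ⟨h2, h4⟩ := h
    exact ⟨by simp, by simp [h2], by simp [h4]⟩

lemma pvAnchor_false {v : Option Int} (h : pvAnchor v = false) :
    ¬(v ≠ none ∧ v ≠ some 2 ∧ v ≠ some 4) := by
  cases v with
  | none => simp
  | some x =>
    simp [pvAnchor] at h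
    intro hc
    by_cases hx : x = 2
    · exact hc.2.1 (by simp [hx])
    · exact hc.2.2 (by simp [h hx])

-- the forward-scan update (IDLE→CATCH, FLY→FLY, CATCH→CATCH)
def pvFwd (e : Int × Option Int) : Int × Option Int :=
  if e.2 = some 0 then (e.1, some 3) else e

-- apply pvFwd to the first anchor of the list
def pvMapFA : List (Int × Option Int) → List (Int × Option Int)
  | [] => []
  | e :: t => if pvAnchor e.2 then pvFwd e :: t else e :: pvMapFA t

def pvTail (seen : Bool) (t : List (Int × Option Int)) : List (Int × Option Int) :=
  if seen then pvMapFA t else t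

lemma pvMapFA_nil : pvMapFA [] = [] := rfl

lemma pvMapFA_cons (e : Int × Option Int) (t : List (Int × Option Int)) :
    pvMapFA (e :: t) = if pvAnchor e.2 then pvFwd e :: t else e :: pvMapFA t := rfl

lemma pvAnchor_pvFwd (e : Int × Option Int) (h : pvAnchor e.2 = true) :
    pvAnchor (pvFwd e).2 = true := by
  unfold pvFwd; split_ifs with h0
  · simp [pvAnchor]
  · exact h

lemma pvFwd_pvFwd (e : Int × Option Int) : pvFwd (pvFwd e) = pvFwd e := by
  unfold pvFwd; split_ifs with h0 h1 <;> simp_all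

lemma pvMapFA_idem (u : List (Int × Option Int)) : pvMapFA (pvMapFA u) = pvMapFA u := by
  induction u with
  | nil => rfl
  | cons e t ih =>
    by_cases h : pvAnchor e.2 = true
    · rw [pvMapFA_cons, if_pos h, pvMapFA_cons, if_pos (pvAnchor_pvFwd e h), pvFwd_pvFwd]
    · simp at h
      rw [pvMapFA_cons, if_neg (by simp [h]), pvMapFA_cons, if_neg (by simp [h]), ih]

lemma pvMapFA_length (u : List (Int × Option Int)) : (pvMapFA u).length = u.length := by
  induction u with
  | nil => rfl
  | cons e t ih => rw [pvMapFA_cons]; split_ifs <;> simp [ih]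

lemma pvTail_length (seen : Bool) (u : List (Int × Option Int)) :
    (pvTail seen u).length = u.length := by
  unfold pvTail; split_ifs <;> simp [pvMapFA_length]

lemma pvTail_cons_nonanchor (seen : Bool) (e : Int × Option Int)
    (t : List (Int × Option Int)) (h : pvAnchor e.2 = false) :
    pvTail seen (e :: t) = e :: pvTail seen t := by
  unfold pvTail; cases seen <;> simp [pvMapFA_cons, h]

lemma pvTail_cons_anchor (seen : Bool) (e : Int × Option Int)
    (t : List (Int × Option Int)) (h : pvAnchor e.2 = true) :
    pvTail seen (e :: t) = (if seen then pvFwd e else e) :: t := by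
  unfold pvTail; cases seen <;> simp [pvMapFA_cons, h]

-- reading and writing at the seam of an append
lemma pvRead (P rest : List (Int × Option Int)) (e d : Int × Option Int) :
    PySem.List.pyGetD (P ++ e :: rest) (P.length : Int) d = e := by
  simp [PySem.List.pyGetD_natCast]

lemma pvWrite (P rest : List (Int × Option Int)) (e x : Int × Option Int) :
    (P ++ e :: rest).set P.length x = P ++ x :: rest := by
  rw [List.set_append_right] <;> simp

-- backward scan skips a block of non-anchors
lemma pvFindBack_skip (buf : List (Int × Option Int))
    (hbuf : ∀ b ∈ buf, pvAnchor b.2 = false) :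
    ∀ (Q rest : List (Int × Option Int)),
      pvFindBack (Q ++ buf ++ rest) (Q.length + buf.length)
        = pvFindBack (Q ++ buf ++ rest) Q.length := by
  induction buf using List.reverseRecOn with
  | nil => intro Q rest; simp
  | append_singleton bs b ih =>
    intro Q rest
    have hb : pvAnchor b.2 = false := hbuf b (by simp)
    have hs : Q ++ (bs ++ [b]) ++ rest = (Q ++ bs) ++ b :: rest := by simp
    have hlen : Q.length + (bs ++ [b]).length = (Q ++ bs).length + 1 := by simp; omega
    rw [hlen, hs, pvFindBack, pvRead, if_neg (pvAnchor_false hb)]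
    have := ih (fun x hx => hbuf x (by simp [hx])) Q (b :: rest)
    simpa using this

-- backward scan hits the pending anchor
lemma pvFindBack_anchor (Q rest : List (Int × Option Int)) (c : Int × Option Int)
    (hc : pvAnchor c.2 = true) :
    pvFindBack (Q ++ c :: rest) (Q.length + 1)
      = Q ++ (if c.2 = some 0 ∨ c.2 = some 1 ∨ c.2 = some 3 then (c.1, some 1) else c) :: rest := by
  rw [pvFindBack, pvRead, if_pos (pvAnchor_true hc)]
  by_cases h0 : c.2 = some 0
  · simp [h0, pvWrite]
  · by_cases h1 : c.2 = some 1
    · simp [h0, h1, pvWrite]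
    · by_cases h3 : c.2 = some 3
      · simp [h0, h1, h3, pvWrite]
      · simp [h0, h1, h3]

-- forward scan applies pvFwd to the first anchor of the suffix
lemma pvFindFwd_eq (u : List (Int × Option Int)) :
    ∀ (Q : List (Int × Option Int)),
      pvFindFwd (Q ++ u) Q.length u.length = Q ++ pvMapFA u := by
  induction u with
  | nil => intro Q; simp [pvFindFwd, pvMapFA]
  | cons e t ih =>
    obtain ⟨a, b⟩ := e
    intro Q
    have hlt : Q.length < (Q ++ (a, b) :: t).length := by simp
    rw [List.length_cons, pvFindFwd, if_pos hlt, pvRead]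
    by_cases ha : pvAnchor (a, b).2 = true
    · rw [if_pos (pvAnchor_true ha)]
      rw [pvMapFA_cons, if_pos ha]
      by_cases h0 : ((a, b) : Int × Option Int).2 = some 0
      · simp only [h0] at *
        simp [pvWrite, pvFwd, h0]
      · by_cases h1 : ((a, b) : Int × Option Int).2 = some 1
        · simp only at h0 h1
          simp [h0, h1, pvWrite, pvFwd]
        · by_cases h3 : ((a, b) : Int × Option Int).2 = some 3
          · simp only at h0 h1 h3
            simp [h0, h1, h3, pvWrite, pvFwd]
          · simp only at h0 h1 h3
            simp [h0, h1, h3, pvFwd]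
    · simp only [Bool.not_eq_true] at ha
      rw [if_neg (pvAnchor_false ha)]
      have := ih (Q ++ [(a, b)])
      simp only [List.append_assoc, List.cons_append, List.nil_append,
        List.length_append, List.length_cons, List.length_nil] at this
      simpa [pvMapFA_cons, ha] using this

-- the backward update of the pending anchor, as B performs it
def pvBackCur : Option (Int × Option Int) → Option (Int × Option Int)
  | some (cid, cv) =>
      if cv = some 0 ∨ cv = some 1 ∨ cv = some 3 then some (cid, some 1) else some (cid, cv)
  | none => none

lemma pvBackCur_none : pvBackCur none = none := rfl

lemma pvBackCur_some (cid : Int) (cv : Option Int) :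
    pvBackCur (some (cid, cv))
      = if cv = some 0 ∨ cv = some 1 ∨ cv = some 3 then some (cid, some 1) else some (cid, cv) := rfl

lemma pvBackCur_toList_length (cur : Option (Int × Option Int)) :
    (pvBackCur cur).toList.length = cur.toList.length := by
  cases cur with
  | none => rfl
  | some c =>
    obtain ⟨cid, cv⟩ := c
    rw [pvBackCur_some]; split_ifs <;> rfl

lemma pvBackCur_anchor (cur : Option (Int × Option Int))
    (h : ∀ c, cur = some c → pvAnchor c.2 = true) :
    ∀ c, pvBackCur cur = some c → pvAnchor c.2 = true := by
  cases cur with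
  | none => intro c hc; simp [pvBackCur] at hc
  | some p =>
    obtain ⟨cid, cv⟩ := p
    intro c hc
    have := h (cid, cv) rfl
    rw [pvBackCur_some] at hc
    split_ifs at hc with h1
    · cases hc.symm; simp [pvAnchor]
    · cases hc.symm; exact this

lemma pvGoB_nil (i : Nat) (done buf : List (Int × Option Int))
    (cur : Option (Int × Option Int)) (seen : Bool) :
    pvGoB [] i done cur buf seen = done ++ cur.toList ++ buf := rfl

lemma pvGoB_cons (nid : Int) (vt : Option Int) (t : List (Int × Option Int)) (i : Nat)
    (done buf : List (Int × Option Int)) (cur : Option (Int × Option Int)) (seen : Bool) :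
    pvGoB ((nid, vt) :: t) i done cur buf seen
      = if vt = none ∧ 0 < i then
          pvGoB t (i+1) done (pvBackCur cur) (buf ++ [(nid, some 2)]) true
        else if vt = none ∨ vt = some 2 ∨ vt = some 4 then
          pvGoB t (i+1) done cur (buf ++ [(nid, vt)]) seen
        else
          pvGoB t (i+1) (done ++ cur.toList ++ buf)
            (some (nid, if seen ∧ vt = some 0 then some 3 else vt)) [] false := by
  cases cur with
  | none => rfl
  | some c => obtain ⟨cid, cv⟩ := c; rfl

-- MASTER INVARIANT: running A's j-loop on a route whose processed prefix is
-- done ++ cur ++ buf (with the forward update already applied to the first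
-- anchor of the tail iff `seen`) is B's single pass over the remaining tail.
lemma pvMaster (t : List (Int × Option Int)) :
    ∀ (done buf : List (Int × Option Int)) (cur : Option (Int × Option Int))
      (seen : Bool) (i : Nat),
      (∀ b ∈ buf, pvAnchor b.2 = false) →
      (∀ c, cur = some c → pvAnchor c.2 = true) →
      (cur = none → ∀ b ∈ done, pvAnchor b.2 = false) →
      0 < i →
      pvLoopA (done ++ cur.toList ++ buf ++ pvTail seen t)
          (done ++ cur.toList ++ buf).length t.length
        = pvGoB t i done cur buf seen := by
  induction t with
  | nil =>
    intro done buf cur seen i hbuf hcur hdone hi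
    cases seen <;> simp [pvTail, pvMapFA_nil, pvLoopA, pvGoB_nil]
  | cons e t ih =>
    intro done buf cur seen i hbuf hcur hdone hi
    obtain ⟨nid, vt⟩ := e
    set P := done ++ cur.toList ++ buf with hP
    by_cases hnone : vt = none
    · -- drone-only node: A sets it to ONLY_DRONE, back-scan hits cur, fwd-scan marks tail
      subst hnone
      have hna : pvAnchor (none : Option Int) = false := rfl
      rw [pvTail_cons_nonanchor seen _ t hna, List.length_cons, pvLoopA]
      have hstep : pvStepA (P ++ (nid, none) :: pvTail seen t) P.length
          = done ++ (pvBackCur cur).toList ++ (buf ++ [(nid, some 2)]) ++ pvTail true t := by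
        simp only [pvStepA, pvRead, if_pos, pvWrite]
        have hback : pvFindBack (P ++ (nid, some 2) :: pvTail seen t) P.length
            = done ++ (pvBackCur cur).toList ++ (buf ++ [(nid, some 2)]) ++ pvTail seen t := by
          cases cur with
          | none =>
            have h1 : P ++ (nid, some 2) :: pvTail seen t
                = ([] : List (Int × Option Int)) ++ (done ++ buf)
                    ++ ((nid, some 2) :: pvTail seen t) := by simp [hP]
            have h2 : P.length = ([] : List (Int × Option Int)).length + (done ++ buf).length := by
              simp [hP]
            rw [h2, h1]
            rw [pvFindBack_skip (done ++ buf)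
              (by intro b hb; rcases List.mem_append.1 hb with h | h
                  · exact hdone rfl b h
                  · exact hbuf b h)]
            simp [pvFindBack, pvBackCur_none]
          | some c =>
            obtain ⟨cid, cv⟩ := c
            have hc := hcur (cid, cv) rfl
            have h1 : P ++ (nid, some 2) :: pvTail seen t
                = (done ++ [(cid, cv)]) ++ buf ++ ((nid, some 2) :: pvTail seen t) := by
              simp [hP]
            have h2 : P.length = (done ++ [(cid, cv)]).length + buf.length := by
              simp [hP]; omega
            rw [h2, h1, pvFindBack_skip buf hbuf]
            have h3 : (done ++ [(cid, cv)]) ++ buf ++ ((nid, some 2) :: pvTail seen t)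
                = done ++ (cid, cv) :: (buf ++ (nid, some 2) :: pvTail seen t) := by simp
            have h4 : (done ++ [(cid, cv)]).length = done.length + 1 := by simp
            rw [h4, h3, pvFindBack_anchor done _ (cid, cv) hc]
            rw [pvBackCur_some]
            split_ifs with h5 <;> simp
        rw [hback]
        have hQ : done ++ (pvBackCur cur).toList ++ (buf ++ [(nid, some 2)]) ++ pvTail seen t
            = (done ++ (pvBackCur cur).toList ++ (buf ++ [(nid, some 2)])) ++ pvTail seen t := by
          simp
        have hQl : (done ++ (pvBackCur cur).toList ++ (buf ++ [(nid, some 2)])).length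
            = P.length + 1 := by simp [hP, pvBackCur_toList_length]; omega
        have hlen2 : ((done ++ (pvBackCur cur).toList ++ (buf ++ [(nid, some 2)]))
              ++ pvTail seen t).length - (P.length + 1) = (pvTail seen t).length := by
          simp [pvBackCur_toList_length, hP, pvTail_length]; omega
        rw [hQ, hlen2, ← hQl, pvTail_length, ← pvTail_length seen t, pvFindFwd_eq]
        cases seen with
        | false => simp [pvTail]
        | true => simp [pvTail, pvMapFA_idem]
      rw [hstep]
      have hl : P.length + 1
          = (done ++ (pvBackCur cur).toList ++ (buf ++ [(nid, some 2)])).length := by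
        simp [hP, pvBackCur_toList_length]; omega
      have happ : done ++ (pvBackCur cur).toList ++ (buf ++ [(nid, some 2)]) ++ pvTail true t
          = done ++ (pvBackCur cur).toList ++ (buf ++ [(nid, some 2)]) ++ pvTail true t := rfl
      rw [hl, ih done (buf ++ [(nid, some 2)]) (pvBackCur cur) true (i+1)
        (by intro b hb; rcases List.mem_append.1 hb with h | h
            · exact hbuf b h
            · simp at h; simp [h, pvAnchor])
        (pvBackCur_anchor cur hcur)
        (by intro h; cases cur with
            | none => intro b hb; exact hdone rfl b hb
            | some c =>
              obtain ⟨cid, cv⟩ := c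
              rw [pvBackCur_some] at h
              split_ifs at h <;> simp_all)
        (by omega)]
      rw [pvGoB_cons, if_pos ⟨rfl, hi⟩]
    · by_cases ha : pvAnchor vt = true
      · -- anchor node: A skips it (not None); it becomes B's new pending anchor
        rw [pvTail_cons_anchor seen _ t ha, List.length_cons, pvLoopA]
        set x' : Int × Option Int := if seen = true then pvFwd (nid, vt) else (nid, vt) with hx'
        have hx'2 : x'.2 ≠ none := by
          rw [hx']; split_ifs with hs
          · unfold pvFwd; split_ifs <;> simp [hnone]
          · exact hnone
        have hstep : pvStepA (P ++ x' :: t) P.length = P ++ x' :: t := by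
          simp only [pvStepA, pvRead, if_neg hx'2]
        rw [hstep]
        have h2 : P ++ x' :: t = P ++ (some x').toList ++ [] ++ pvTail false t := by
          simp [pvTail]
        have hl : P.length + 1 = (P ++ (some x').toList ++ ([] : List (Int × Option Int))).length := by
          simp
        rw [h2, hl, ih P [] (some x') false (i+1)
          (by intro b hb; simp at hb)
          (by intro c hc; cases hc
              rw [hx']; split_ifs with hs
              · exact pvAnchor_pvFwd (nid, vt) ha
              · exact ha)
          (by intro h; cases h)
          (by omega)]
        have hxeq : x' = (nid, if seen = true ∧ vt = some 0 then some 3 else vt) := by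
          rw [hx']; unfold pvFwd
          cases seen with
          | false => simp
          | true => by_cases h0 : vt = some 0 <;> simp [h0]
        have hvt2 : ¬(vt = none ∨ vt = some 2 ∨ vt = some 4) := by
          have h := pvAnchor_true ha; push_neg; exact ⟨hnone, h.2.1, h.2.2⟩
        rw [pvGoB_cons, if_neg (fun h => hnone h.1), if_neg hvt2, ← hxeq, hP]
      · -- ONLY_DRONE / ONLY_TRUCK node: both sides skip it into the buffer
        simp only [Bool.not_eq_true] at ha
        rw [pvTail_cons_nonanchor seen _ t ha, List.length_cons, pvLoopA]
        have hstep : pvStepA (P ++ (nid, vt) :: pvTail seen t) P.length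
            = P ++ (nid, vt) :: pvTail seen t := by
          simp only [pvStepA, pvRead, if_neg hnone]
        rw [hstep]
        have h2 : P ++ (nid, vt) :: pvTail seen t
            = done ++ cur.toList ++ (buf ++ [(nid, vt)]) ++ pvTail seen t := by simp [hP]
        have hl : P.length + 1 = (done ++ cur.toList ++ (buf ++ [(nid, vt)])).length := by
          simp [hP]; omega
        rw [h2, hl, ih done (buf ++ [(nid, vt)]) cur seen (i+1)
          (by intro b hb; rcases List.mem_append.1 hb with h | h
              · exact hbuf b h
              · simp at h; simp [h, ha])
          hcur hdone (by omega)]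
        have hvt2 : vt = none ∨ vt = some 2 ∨ vt = some 4 := by
          cases vt with
          | none => exact Or.inl rfl
          | some x =>
            simp [pvAnchor] at ha
            by_cases hx : x = 2
            · exact Or.inr (Or.inl (by simp [hx]))
            · exact Or.inr (Or.inr (by simp [ha hx]))
        rw [pvGoB_cons, if_neg (fun h => hnone h.1), if_pos hvt2]

-- per-route equality
lemma pvRoute_eq (r : List (Int × Option Int)) :
    pvLoopA r 1 (r.length - 1) = pvGoB r 0 [] none [] false := by
  cases r with
  | nil => rfl
  | cons e t =>
    obtain ⟨nid, vt⟩ := e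
    rw [List.length_cons, Nat.add_sub_cancel]
    by_cases ha : pvAnchor vt = true
    · have hm := pvMaster t [] [] (some (nid, vt)) false 1
        (by intro b hb; simp at hb)
        (by intro c hc; cases hc; exact ha)
        (by intro h; cases h) (by omega)
      simp only [List.nil_append, Option.toList_some, List.append_nil, pvTail,
        Bool.false_eq_true, if_false, List.length_cons, List.length_nil] at hm
      have hvt2 : ¬(vt = none ∨ vt = some 2 ∨ vt = some 4) := by
        have h := pvAnchor_true ha; push_neg
        exact ⟨h.1, h.2.1, h.2.2⟩
      rw [pvGoB_cons, if_neg (by simp), if_neg hvt2]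
      simpa using hm
    · simp only [Bool.not_eq_true] at ha
      have hm := pvMaster t [] [(nid, vt)] none false 1
        (by intro b hb; rw [List.mem_singleton] at hb; subst hb; exact ha)
        (by intro c hc; cases hc)
        (by intro _ b hb; cases hb) (by omega)
      simp only [List.nil_append, Option.toList_none, pvTail, Bool.false_eq_true,
        if_false, List.length_cons, List.length_nil] at hm
      have hvt2 : vt = none ∨ vt = some 2 ∨ vt = some 4 := by
        cases vt with
        | none => exact Or.inl rfl
        | some x =>
          simp [pvAnchor] at ha
          by_cases hx : x = 2
          · exact Or.inr (Or.inl (by simp [hx]))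
          · exact Or.inr (Or.inr (by simp [ha hx]))
      rw [pvGoB_cons, if_neg (by simp), if_pos hvt2]
      simpa using hm

-- ===== VERDICT (by name: the statement is the Claim_ definition above) =====
theorem drone_repair_visit_type_update_spec : Claim_equal_drone_repair_visit_type_update := by
  intro routes _
  unfold Spec_drone_repair_visit_type_update drone_repair_visit_type_update
    drone_repair_visit_type_update_alt
  exact List.map_congr_left (fun r _ => pvRoute_eq r)
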